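-- pv_equiv track=rewrite | github.com/yoonbang98/Backjoon | 백준/Platinum/23291. 어항 정리/어항 정리.py | fly2
-- ===== SOURCE A (Python) =====
-- def fly2(fish_bowl):
--     N = len(fish_bowl)
--     field_tmp = []
--     field_tmp.append(fish_bowl[:int(N/2)][::-1])
--     field_tmp.append(fish_bowl[int(N/2):])
--     field_left = []
--     field_right = []
--     for row in field_tmp:
--         field_left.append(row[:int(N/4)])
--         field_right.append(row[int(N/4):])
--     for _ in range(2):
--         field_left = list(map(list, zip(*field_left[::-1])))
--     return field_left + field_right
-- ===== SOURCE B (Python) =====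
-- def fly2(fish_bowl):
--     N = len(fish_bowl)
--     half, quarter = int(N / 2), int(N / 4)
--     top = fish_bowl[:half][::-1]
--     bottom = fish_bowl[half:]
--     # 180-degree rotation of the 2-row left block done directly: swap the two
--     # quarter slices and reverse each.  A zero-width block has no rows at all
--     # (zip-transpose semantics), hence the guard on quarter.
--     left = [bottom[:quarter][::-1], top[:quarter][::-1]] if quarter else []
--     return left + [top[quarter:], bottom[quarter:]]
-- ===== Notes on version B (the rewrite author's own statement) =====
-- stated objective: simpler
-- what changed: Replaces A's row-splitting loop over field_tmp and the two zip-transpose passes that rotate the 2-row left block by slicing directly and computing the 180-degree rotation as 'swap the two quarter slices and reverse each' (empty when the block has zero width, as zip leaves it).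
import Mathlib
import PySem

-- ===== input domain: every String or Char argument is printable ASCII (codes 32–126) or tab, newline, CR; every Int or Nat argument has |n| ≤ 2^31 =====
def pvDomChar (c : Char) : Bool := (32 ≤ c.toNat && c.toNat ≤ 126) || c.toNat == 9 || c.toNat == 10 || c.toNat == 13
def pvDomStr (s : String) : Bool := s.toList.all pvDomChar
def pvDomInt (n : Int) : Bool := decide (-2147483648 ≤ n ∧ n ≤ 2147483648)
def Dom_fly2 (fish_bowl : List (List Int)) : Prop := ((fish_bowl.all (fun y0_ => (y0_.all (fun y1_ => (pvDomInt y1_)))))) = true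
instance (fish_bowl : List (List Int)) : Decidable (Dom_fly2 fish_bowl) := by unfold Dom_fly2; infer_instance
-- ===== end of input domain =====

-- B replaces A's row-splitting loop and double zip-transpose of the 2-row left block by a
-- direct 180° rotation (swap the two quarter slices and reverse each); objective: simpler.

-- ===== PORT A =====
-- zip(*rows) : truncates to the shortest row; structural recursion on the first row.
def pyZipGo {α : Type} (r : List α) (rs : List (List α)) : List (List α) :=
  match r with
  | [] => []
  | a :: r' =>
    if rs.any (·.isEmpty) then []
    else (a :: rs.filterMap (·.head?)) :: pyZipGo r' (rs.map (·.tail))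

def pyZipN {α : Type} (rows : List (List α)) : List (List α) :=
  match rows with
  | [] => []
  | r :: rs => pyZipGo r rs

-- int(N/2) = N // 2 here since N = len(fish_bowl) ≥ 0; xs[::-1] is List.reverse
-- (PySem.List.slice?_none_none_neg_one).
def fly2 (fish_bowl : List (List Int)) : List (List (List Int)) :=
  let N : Int := fish_bowl.length
  let field_tmp : List (List (List Int)) :=
    [ (PySem.List.slice fish_bowl none (some (PySem.Int.floordiv N 2))).reverse,
      PySem.List.slice fish_bowl (some (PySem.Int.floordiv N 2)) none ]
  let pairs := field_tmp.foldl
    (fun (acc : List (List (List Int)) × List (List (List Int))) row =>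
      (acc.1 ++ [PySem.List.slice row none (some (PySem.Int.floordiv N 4))],
       acc.2 ++ [PySem.List.slice row (some (PySem.Int.floordiv N 4)) none]))
    ([], [])
  let field_left := (List.range 2).foldl (fun fl _ => pyZipN fl.reverse) pairs.1
  field_left ++ pairs.2

-- ===== PORT B =====
def fly2_alt (fish_bowl : List (List Int)) : List (List (List Int)) :=
  let N : Int := fish_bowl.length
  let half := PySem.Int.floordiv N 2
  let quarter := PySem.Int.floordiv N 4
  let top := (PySem.List.slice fish_bowl none (some half)).reverse
  let bottom := PySem.List.slice fish_bowl (some half) none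
  let left : List (List (List Int)) :=
    if quarter ≠ 0 then
      [ (PySem.List.slice bottom none (some quarter)).reverse,
        (PySem.List.slice top none (some quarter)).reverse ]
    else []
  left ++ [ PySem.List.slice top (some quarter) none,
            PySem.List.slice bottom (some quarter) none ]

-- ===== PRECONDITION & SPEC =====
def Spec_fly2 (fish_bowl : List (List Int)) (out : List (List (List Int))) : Prop :=
  out = fly2_alt fish_bowl
instance (fish_bowl : List (List Int)) (out : List (List (List Int))) : Decidable (Spec_fly2 fish_bowl out) := by unfold Spec_fly2; infer_instance

-- ===== CLAIM (what is proved, stated in full; the proofs are below) =====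
def Claim_equal_fly2 : Prop := ∀ (fish_bowl : List (List Int)), Dom_fly2 fish_bowl → Spec_fly2 fish_bowl (fly2 fish_bowl)

-- ===== LEMMAS AND PROOFS =====

-- zip(*[y, x]) is zipWith of the two rows
theorem pyZipN_pair {α : Type} (y x : List α) :
    pyZipN [y, x] = List.zipWith (fun a b => [a, b]) y x := by
  show pyZipGo y [x] = _
  induction y generalizing x with
  | nil => cases x <;> rfl
  | cons a y' ih =>
    cases x with
    | nil => rfl
    | cons b x' =>
      simp [pyZipGo, ih]

theorem filterMap_head?_zipWith_pair {α : Type} (u v : List α) (h : u.length = v.length) :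
    (List.zipWith (fun a b => [a, b]) u v).filterMap (·.head?) = u := by
  induction u generalizing v with
  | nil => simp
  | cons a u' ih =>
    cases v with
    | nil => simp at h
    | cons b v' => simp_all

theorem map_tail_zipWith_pair {α : Type} (u v : List α) (h : u.length = v.length) :
    (List.zipWith (fun a b => [a, b]) u v).map (·.tail) = v.map (fun b => [b]) := by
  induction u generalizing v with
  | nil => cases v <;> simp_all
  | cons a u' ih =>
    cases v with
    | nil => simp at h
    | cons b v' => simp_all

theorem any_isEmpty_zipWith_pair {α : Type} (u v : List α) :
    (List.zipWith (fun a b => [a, b]) u v).any (·.isEmpty) = false := by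
  induction u generalizing v with
  | nil => simp
  | cons a u' ih =>
    cases v with
    | nil => simp
    | cons b v' =>
      rw [List.zipWith_cons_cons, List.any_cons, ih v']
      rfl

-- zip(*rows) of a 2-column matrix recovers the two columns
theorem pyZipN_zipWith_pair {α : Type} (u v : List α) (h : u.length = v.length) (hu : u ≠ []) :
    pyZipN (List.zipWith (fun a b => [a, b]) u v) = [u, v] := by
  cases u with
  | nil => exact absurd rfl hu
  | cons a u' =>
    cases v with
    | nil => simp at h
    | cons b v' =>
      have h' : u'.length = v'.length := by simpa using h
      rw [List.zipWith_cons_cons]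
      show pyZipGo [a, b] (List.zipWith (fun a b => [a, b]) u' v') = _
      simp only [pyZipGo, any_isEmpty_zipWith_pair, if_neg Bool.false_ne_true,
        filterMap_head?_zipWith_pair u' v' h', map_tail_zipWith_pair u' v' h']
      -- second zip step: rows are the singletons [b], [v'₀], …
      have h1 : (v'.map (fun b => [b])).any (·.isEmpty) = false := by
        simp [List.any_map, Function.comp]
      have h2 : (v'.map (fun b => [b])).filterMap (·.head?) = v' := by
        simp [List.filterMap_map, Function.comp]
      simp only [h1, if_neg Bool.false_ne_true, h2]

-- applying A's zip-transpose twice to a 2-row rectangular block is the 180° rotation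
theorem double_zip_rot {α : Type} (x y : List α) (h : x.length = y.length) (hx : x ≠ []) :
    pyZipN ((pyZipN [y, x]).reverse) = [y.reverse, x.reverse] := by
  rw [pyZipN_pair, List.reverse_zipWith, pyZipN_zipWith_pair]
  · simpa using h.symm
  · simp only [ne_eq, List.reverse_eq_nil_iff]
    intro hy
    apply hx
    rw [← List.length_eq_zero_iff] at hy ⊢
    omega
  · exact h.symm

theorem fly2_spec_aux (fb : List (List Int)) : fly2 fb = fly2_alt fb := by
  set n := fb.length with hn_def
  have hh : PySem.Int.floordiv (n : Int) 2 = ((n / 2 : Nat) : Int) := by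
    exact_mod_cast PySem.Int.floordiv_natCast n 2
  have hq : PySem.Int.floordiv (n : Int) 4 = ((n / 4 : Nat) : Int) := by
    exact_mod_cast PySem.Int.floordiv_natCast n 4
  by_cases hn : 4 ≤ n
  · -- the left block has quarter = n/4 ≥ 1 rows of equal width; the double zip-transpose
    -- is the 180° rotation
    have hq1 : ((n / 4 : Nat) : Int) ≠ 0 := by
      have : 1 ≤ n / 4 := by omega
      exact_mod_cast by omega
    simp only [fly2, fly2_alt, hh, hq, ← hn_def, PySem.List.slice_to_natCast,
      PySem.List.slice_from_natCast, List.foldl, show List.range 2 = [0, 1] from rfl,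
      List.foldl_cons, List.singleton_append, List.nil_append, if_pos hq1, ne_eq]
    set t := (fb.take (n / 2)).reverse with ht
    set b := fb.drop (n / 2) with hb
    have hlt : t.length = n / 2 := by simp [ht, hn_def.symm]; omega
    have hlb : b.length = n - n / 2 := by simp [hb, hn_def.symm]
    have hxl : (t.take (n / 4)).length = n / 4 := by simp [hlt]; omega
    have hyl : (b.take (n / 4)).length = n / 4 := by simp [hlb]; omega
    have hx : t.take (n / 4) ≠ [] := by
      intro h0
      have := congrArg List.length h0
      rw [hxl] at this
      simp at this
      omega
    rw [show ([t.take (n / 4), b.take (n / 4)]).reverse = [b.take (n / 4), t.take (n / 4)] from rfl,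
      double_zip_rot (t.take (n / 4)) (b.take (n / 4)) (by rw [hxl, hyl]) hx]
  · -- n < 4: quarter = 0, the left block is empty on both sides
    have hq0 : n / 4 = 0 := by omega
    simp only [fly2, fly2_alt, hh, hq, hq0, ← hn_def, PySem.List.slice_to_natCast,
      PySem.List.slice_from_natCast, List.foldl, show List.range 2 = [0, 1] from rfl,
      List.foldl_cons, List.singleton_append, List.nil_append, List.take_zero]
    simp [pyZipN, pyZipGo]

-- ===== VERDICT (by name: the statement is the Claim_ definition above) =====
theorem fly2_spec : Claim_equal_fly2 := fun fb _ => fly2_spec_aux fb
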